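-- pv_equiv track=rewrite | github.com/dannysheyn/bonter | bot-engine/showBot.py | escape_msg
-- ===== SOURCE A (Python) =====
-- def escape_msg(msg: str):
--     escaped_msg = ''
--     for index, char in enumerate(msg):
--         if char == '{' or char == '}':
--             escaped_msg += '\\' + char
--         else:
--             escaped_msg += char
--     return escaped_msg
-- ===== SOURCE B (Python) =====
-- def escape_msg(msg: str):
--     return msg.replace('{', '\\{').replace('}', '\\}')
-- ===== Notes on version B (the rewrite author's own statement) =====
-- stated objective: simpler
-- what changed: Replaced the per-character accumulation loop by two whole-string replace passes ('{' first so the introduced backslash is never re-escaped); str.replace runs at C level, avoiding per-character Python bytecode and repeated concatenation.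
import Mathlib
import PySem

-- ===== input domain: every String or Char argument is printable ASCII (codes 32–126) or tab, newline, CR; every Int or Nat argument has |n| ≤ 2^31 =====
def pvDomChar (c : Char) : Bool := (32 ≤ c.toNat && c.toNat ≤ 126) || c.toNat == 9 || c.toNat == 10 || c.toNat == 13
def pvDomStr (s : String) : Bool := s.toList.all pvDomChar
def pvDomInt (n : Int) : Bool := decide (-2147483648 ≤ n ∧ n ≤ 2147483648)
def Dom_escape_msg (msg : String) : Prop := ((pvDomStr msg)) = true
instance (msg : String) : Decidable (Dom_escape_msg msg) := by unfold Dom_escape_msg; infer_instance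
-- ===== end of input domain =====

-- B replaces A's per-character accumulation loop by two whole-string replace passes
-- ('{' first, so the backslash it introduces is never re-escaped); objective: simpler.

-- ===== PORT A =====
-- for index, char in enumerate(msg): accumulate into escaped_msg
def escape_msg (msg : String) : String :=
  (PySem.List.enumerate msg.toList).foldl
    (fun acc p =>
      if p.2 = '{' ∨ p.2 = '}' then acc ++ String.ofList ['\\', p.2]
      else acc ++ String.ofList [p.2]) ""

-- ===== PORT B =====
-- msg.replace('{', '\\{').replace('}', '\\}')
def escape_msg_alt (msg : String) : String :=
  PySem.Str.replace (PySem.Str.replace msg "{" "\\{") "}" "\\}"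

-- ===== PRECONDITION & SPEC =====
def Spec_escape_msg (msg : String) (out : String) : Prop := out = escape_msg_alt msg
instance (msg : String) (out : String) : Decidable (Spec_escape_msg msg out) := by unfold Spec_escape_msg; infer_instance

-- ===== CLAIM (what is proved, stated in full; the proofs are below) =====
def Claim_equal_escape_msg : Prop := ∀ (msg : String), Dom_escape_msg msg → Spec_escape_msg msg (escape_msg msg)

-- ===== LEMMAS AND PROOFS =====

-- single-character-pattern replace is a flatMap over the characters
theorem replace_go_single (a : Char) (new : List Char) :
    ∀ (fuel : Nat) (l acc : List Char), l.length ≤ fuel →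
      PySem.Chars.replace.go [a] new fuel l acc =
        acc.reverse ++ l.flatMap (fun c => if c = a then new else [c]) := by
  intro fuel
  induction fuel with
  | zero =>
    intro l acc h
    have : l = [] := List.eq_nil_of_length_eq_zero (Nat.le_zero.mp h)
    subst this
    simp [PySem.Chars.replace.go]
  | succ n ih =>
    intro l acc h
    cases l with
    | nil => simp [PySem.Chars.replace.go]
    | cons c t =>
      by_cases hc : c = a
      · subst hc
        have hp : List.isPrefixOf [c] (c :: t) = true := by
          simp [List.isPrefixOf]
        rw [PySem.Chars.replace.go]
        simp only [hp, if_true, List.length_cons, List.length_nil, List.drop_succ_cons,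
          List.drop_zero]
        rw [ih t (new.reverse ++ acc) (by simpa using Nat.le_of_succ_le_succ h)]
        simp
      · have hp : List.isPrefixOf [a] (c :: t) = false := by
          simp [List.isPrefixOf]; exact fun h' => absurd h'.symm hc
        rw [PySem.Chars.replace.go]
        simp only [hp, Bool.false_eq_true, if_false]
        rw [ih t (c :: acc) (by simpa using Nat.le_of_succ_le_succ h)]
        simp [hc]

theorem replace_single (a : Char) (new s : List Char) :
    PySem.Chars.replace s [a] new = s.flatMap (fun c => if c = a then new else [c]) := by
  rw [PySem.Chars.replace]
  simp only [List.isEmpty_cons, Bool.false_eq_true, if_false]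
  simpa using replace_go_single a new s.length s [] (le_refl _)

-- the escape map on one character
def escChar (c : Char) : List Char := if c = '{' ∨ c = '}' then ['\\', c] else [c]

-- A's loop computes acc ++ flatMap escChar (stated on character lists)
theorem escape_msg_loop (l : List Char) :
    ∀ (i : Int) (acc : String),
      ((PySem.List.enumerate l i).foldl
        (fun acc p =>
          if p.2 = '{' ∨ p.2 = '}' then acc ++ String.ofList ['\\', p.2]
          else acc ++ String.ofList [p.2]) acc).toList
      = acc.toList ++ l.flatMap escChar := by
  induction l with
  | nil => intro i acc; simp [PySem.List.enumerate_nil]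
  | cons c t ih =>
    intro i acc
    rw [PySem.List.enumerate_cons]
    simp only [List.foldl_cons]
    by_cases hc : c = '{' ∨ c = '}'
    · simp only [hc, if_true]
      rw [ih (i + 1)]
      simp [escChar, hc, String.toList_append]
    · simp only [hc, if_false]
      rw [ih (i + 1)]
      simp [escChar, hc, String.toList_append]

theorem escape_msg_toList (msg : String) :
    (escape_msg msg).toList = msg.toList.flatMap escChar := by
  unfold escape_msg
  rw [escape_msg_loop msg.toList 0 ""]
  simp

-- ===== VERDICT (by name: the statement is the Claim_ definition above) =====
theorem escape_msg_spec : Claim_equal_escape_msg := by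
  intro msg _
  unfold Spec_escape_msg escape_msg_alt
  apply String.ext
  rw [escape_msg_toList]
  simp only [PySem.Str.toList_replace,
    show ("{" : String).toList = ['{'] from rfl, show ("}" : String).toList = ['}'] from rfl,
    show ("\\{" : String).toList = ['\\', '{'] from rfl,
    show ("\\}" : String).toList = ['\\', '}'] from rfl]
  rw [replace_single, replace_single]
  rw [List.flatMap_assoc]
  congr 1
  funext c
  by_cases h1 : c = '{'
  · subst h1; simp [escChar]
  · by_cases h2 : c = '}'
    · subst h2; simp [escChar]
    · simp [escChar, h1, h2]
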